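-- pv_equiv track=rewrite | github.com/jcandee531/BIN-Lookup | bin_lookup_client.py | format_card_number
-- ===== SOURCE A (Python) =====
-- def format_card_number(card_number: str) -> str:
--     """Format card number with spaces for display"""
--     if not card_number:
--         return ""
--
--     clean_number = ''.join(filter(str.isdigit, card_number))
--
--     # Format in groups of 4
--     formatted = ""
--     for i in range(0, len(clean_number), 4):
--         if i > 0:
--             formatted += " "
--         formatted += clean_number[i:i+4]
--
--     return formatted
-- ===== SOURCE B (Python) =====
-- def format_card_number(card_number: str) -> str:
--     """Format card number with spaces for display"""
--     if not card_number:
--         return ""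
--
--     clean_number = ''.join(filter(str.isdigit, card_number))
--
--     # Recursively split into a list of 4-digit chunks, then join with spaces
--     def chunks(s):
--         if len(s) <= 4:
--             return [s]
--         return [s[:4]] + chunks(s[4:])
--
--     return ' '.join(chunks(clean_number))
-- ===== Notes on version B (the rewrite author's own statement) =====
-- stated objective: alternative
-- what changed: A builds the output string imperatively by striding an index range in steps of 4 and appending a separator-then-slice per step; B recursively decomposes the cleaned digits into a list of chunks (take 4 / recurse on the rest) and joins that chunk list with single-space separators.
import Mathlib
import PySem

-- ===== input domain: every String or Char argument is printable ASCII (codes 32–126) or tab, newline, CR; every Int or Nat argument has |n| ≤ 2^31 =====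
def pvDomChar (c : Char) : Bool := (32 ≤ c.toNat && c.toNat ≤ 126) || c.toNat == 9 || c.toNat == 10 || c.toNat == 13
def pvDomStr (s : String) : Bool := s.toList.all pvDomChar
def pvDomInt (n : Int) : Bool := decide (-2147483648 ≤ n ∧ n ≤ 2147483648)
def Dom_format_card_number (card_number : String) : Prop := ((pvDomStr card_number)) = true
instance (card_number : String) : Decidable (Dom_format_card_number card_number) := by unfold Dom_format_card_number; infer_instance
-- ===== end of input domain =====

-- B replaces A's stride-4 index loop that appends separator+slice to a string by a
-- recursive decomposition into a list of 4-char chunks joined with ' ' (objective: alternative).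

-- ===== PORT A =====
def format_card_number (card_number : String) : String :=
  if card_number.toList = [] then ""
  else
    let clean_number : List Char := card_number.toList.filter PySem.Chars.isdigit
    let formatted : List Char :=
      (PySem.List.pyRange 0 clean_number.length 4).foldl
        (fun acc i =>
          (if i > 0 then acc ++ [' '] else acc) ++
            PySem.List.slice clean_number (some i) (some (i + 4))) []
    String.ofList formatted

-- ===== PORT B =====
-- chunks(s): [s] if len(s) <= 4 else [s[:4]] + chunks(s[4:])
def chunksB (s : List Char) : List (List Char) :=
  if s.length ≤ 4 then [s] else s.take 4 :: chunksB (s.drop 4)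
termination_by s.length
decreasing_by simp; omega

def format_card_number_alt (card_number : String) : String :=
  if card_number.toList = [] then ""
  else
    let clean_number : List Char := card_number.toList.filter PySem.Chars.isdigit
    String.ofList (PySem.Chars.join [' '] (chunksB clean_number))

-- ===== PRECONDITION & SPEC =====
def Spec_format_card_number (card_number : String) (out : String) : Prop := out = format_card_number_alt card_number
instance (card_number : String) (out : String) : Decidable (Spec_format_card_number card_number out) := by unfold Spec_format_card_number; infer_instance

-- ===== CLAIM (what is proved, stated in full; the proofs are below) =====
def Claim_equal_format_card_number : Prop := ∀ (card_number : String), Dom_format_card_number card_number → Spec_format_card_number card_number (format_card_number card_number)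

-- ===== LEMMAS AND PROOFS =====

-- the tail of the formatted output after the first chunk: " XXXX" per remaining chunk
def sepChunks : List Char → List Char
  | [] => []
  | a :: t => ' ' :: (List.take 4 (a :: t) ++ sepChunks (List.drop 4 (a :: t)))
termination_by l => l.length
decreasing_by simp

theorem pyRange4_nil (a b : Int) (h : b ≤ a) : PySem.List.pyRange a b 4 = [] := by
  rw [PySem.List.pyRange_of_pos a b (by norm_num)]
  rw [if_neg (by omega)]
  simp

theorem pyRange4_cons (a b : Int) (h : a < b) :
    PySem.List.pyRange a b 4 = a :: PySem.List.pyRange (a + 4) b 4 := by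
  rw [PySem.List.pyRange_of_pos a b (by norm_num),
      PySem.List.pyRange_of_pos (a + 4) b (by norm_num)]
  have hm : ((b - a + 4 - 1) / 4).toNat
      = (if a + 4 < b then ((b - (a + 4) + 4 - 1) / 4).toNat else 0) + 1 := by
    split_ifs with h4 <;> omega
  rw [if_pos h, hm, List.range_succ_eq_map]
  simp only [List.map_cons, List.map_map]
  congr 1
  · norm_num
  · apply List.map_congr_left
    intro k _
    simp only [Function.comp_apply]
    push_cast
    ring

-- A's loop from any chunk boundary j ≥ 4 produces acc ++ sepChunks (cs.drop j)
theorem lemA (t : List Char) : ∀ (cs : List Char) (j : Nat) (acc : List Char),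
    4 ≤ j → cs.drop j = t →
    (PySem.List.pyRange (j : Int) (cs.length : Int) 4).foldl
      (fun acc i =>
        (if i > 0 then acc ++ [' '] else acc) ++
          PySem.List.slice cs (some i) (some (i + 4))) acc
      = acc ++ sepChunks t := by
  induction t using sepChunks.induct with
  | case1 =>
    intro cs j acc _ hdrop
    have hle : cs.length ≤ j := by
      by_contra h
      have := List.drop_eq_nil_iff.mp hdrop
      omega
    rw [pyRange4_nil _ _ (by exact_mod_cast hle)]
    simp [sepChunks]
  | case2 a t ih =>
    intro cs j acc hj hdrop
    have hlt : j < cs.length := by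
      by_contra h
      rw [List.drop_eq_nil_of_le (by omega)] at hdrop
      exact List.cons_ne_nil a t hdrop.symm
    rw [pyRange4_cons _ _ (by exact_mod_cast hlt)]
    rw [List.foldl_cons]
    have hslice : PySem.List.slice cs (some (j : Int)) (some ((j : Int) + 4))
        = List.take 4 (a :: t) := by
      have : ((j : Int) + 4) = ((j : Int) + ((4 : Nat) : Int)) := by push_cast; ring
      rw [this, PySem.List.slice_natCast_add, hdrop]
    rw [if_pos (by exact_mod_cast Nat.lt_of_lt_of_le (by norm_num) hj), hslice]
    have hcast : ((j : Int) + 4) = (((j + 4 : Nat)) : Int) := by push_cast; ring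
    rw [hcast, ih cs (j + 4) _ (by omega) (by rw [← List.drop_drop, hdrop])]
    simp [sepChunks]

-- both representations compute take 4 ++ sepChunks (drop 4)
theorem mainA (cs : List Char) :
    (PySem.List.pyRange 0 cs.length 4).foldl
      (fun acc i =>
        (if i > 0 then acc ++ [' '] else acc) ++
          PySem.List.slice cs (some i) (some (i + 4))) []
      = cs.take 4 ++ sepChunks (cs.drop 4) := by
  match cs with
  | [] => simp [pyRange4_nil 0 0 (by norm_num), sepChunks]
  | a :: t =>
    rw [pyRange4_cons 0 _ (by exact_mod_cast Nat.succ_pos t.length), List.foldl_cons]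
    have hsl : PySem.List.slice (a :: t) (some 0) (some ((0 : Int) + 4))
        = List.take 4 (a :: t) := by
      rw [show ((0 : Int) + 4) = (4 : Int) by norm_num, PySem.List.slice_zero_start,
          PySem.List.slice_to _ (by norm_num)]
      congr 1
    rw [if_neg (by norm_num), hsl, show ((0 : Int) + 4) = ((4 : Nat) : Int) by norm_num]
    simp only [List.nil_append]
    exact lemA _ _ 4 _ (by norm_num) rfl

theorem chunksB_ne_nil (s : List Char) : chunksB s ≠ [] := by
  unfold chunksB
  split <;> simp

theorem mainB (cs : List Char) :
    PySem.Chars.join [' '] (chunksB cs) = cs.take 4 ++ sepChunks (cs.drop 4) := by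
  induction cs using chunksB.induct with
  | case1 s hle =>
    rw [chunksB, if_pos hle]
    rw [List.take_of_length_le hle, List.drop_eq_nil_of_le hle]
    simp [PySem.Chars.join_singleton, sepChunks]
  | case2 s hle ih =>
    rw [chunksB, if_neg hle]
    obtain ⟨x, xs, hx⟩ : ∃ x xs, chunksB (s.drop 4) = x :: xs := by
      cases h : chunksB (s.drop 4) with
      | nil => exact absurd h (chunksB_ne_nil _)
      | cons x xs => exact ⟨x, xs, rfl⟩
    rw [hx, PySem.Chars.join_cons_cons, ← hx, ih]
    obtain ⟨a, t, hd⟩ : ∃ a t, s.drop 4 = a :: t := by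
      cases h : s.drop 4 with
      | nil => exact absurd (List.drop_eq_nil_iff.mp h) (by omega)
      | cons a t => exact ⟨a, t, rfl⟩
    conv_rhs => rw [hd]
    rw [sepChunks, ← hd]
    simp

-- ===== VERDICT (by name: the statement is the Claim_ definition above) =====
theorem format_card_number_spec : Claim_equal_format_card_number := by
  intro card_number _
  unfold Spec_format_card_number format_card_number format_card_number_alt
  split
  · rfl
  · simp only [mainA, mainB]
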